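-- pv_equiv track=rewrite | github.com/Baverne/comfyUI-TiledWan | nodes.py | _calculate_temporal_tiles
-- ===== SOURCE A (Python) =====
-- def _calculate_temporal_tiles(total_frames, target_frames, overlap):
--     """Calculate temporal tile ranges with overlap handling"""
--     tiles = []
--
--     if total_frames <= target_frames:
--         tiles.append((0, total_frames))
--     else:
--         stride = target_frames - overlap
--         current = 0
--
--         while current < total_frames:
--             end = min(current + target_frames, total_frames)
--             remaining = total_frames - end
--
--             if remaining > 0:
--                 tiles.append((current, end))
--                 if remaining < stride:
--                     final_start = total_frames - target_frames
--                     tiles.append((final_start, total_frames))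
--                     break
--             else:
--                 tiles.append((current, end))
--                 break
--
--             current += stride
--
--     return tiles
-- ===== SOURCE B (Python) =====
-- def _calculate_temporal_tiles(total_frames, target_frames, overlap):
--     """Calculate temporal tile ranges with overlap handling."""
--     if total_frames <= target_frames:
--         return [(0, total_frames)]
--     stride = target_frames - overlap
--     # number of regular tiles = ceil((total_frames - target_frames) / stride), closed form
--     n = -((target_frames - total_frames) // stride)
--     return [(k * stride, k * stride + target_frames) for k in range(n)] \
--         + [(total_frames - target_frames, total_frames)]
-- ===== Notes on version B (the rewrite author's own statement) =====
-- stated objective: simpler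
-- what changed: Replaces A's stateful while-loop (min/remaining look-ahead, branch, early break) with a closed form: the number of regular tiles is computed arithmetically as the ceiling division -((target_frames - total_frames) // stride), tiles are generated from range(n), and the fixed tail tile is appended; Pre_ restricts to the natural domain (positive target_frames when tiling is needed, and positive stride, without which A's loop never terminates).
-- outside the precondition, e.g. on _calculate_temporal_tiles(5, -1, -3): A returns [(0, -1), (2, 1), (4, 3)], B returns [(0, -1), (2, 1), (4, 3), (6, 5)]
import Mathlib
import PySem

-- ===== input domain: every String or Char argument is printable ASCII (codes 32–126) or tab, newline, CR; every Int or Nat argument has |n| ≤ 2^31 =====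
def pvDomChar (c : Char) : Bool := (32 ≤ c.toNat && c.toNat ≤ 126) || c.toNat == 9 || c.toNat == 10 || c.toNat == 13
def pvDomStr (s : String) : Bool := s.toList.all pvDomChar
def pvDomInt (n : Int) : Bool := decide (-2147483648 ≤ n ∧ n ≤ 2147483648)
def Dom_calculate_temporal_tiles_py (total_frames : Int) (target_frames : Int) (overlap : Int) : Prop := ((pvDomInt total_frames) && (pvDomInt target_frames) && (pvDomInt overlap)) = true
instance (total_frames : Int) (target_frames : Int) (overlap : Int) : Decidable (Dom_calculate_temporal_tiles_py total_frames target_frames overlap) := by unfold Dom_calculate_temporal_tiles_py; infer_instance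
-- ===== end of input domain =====

-- B replaces A's stateful look-ahead/early-break while-loop by a closed form: the number of
-- regular tiles is computed arithmetically as ceil((total-target)/stride) and the tiles are
-- generated from range(n), plus the fixed tail tile (simpler decomposition; same cost).


-- ===== PORT A =====
-- A's while-loop, fuel-guarded to make it total (Pre_ guarantees the fuel suffices).
def pvALoop (total_frames target_frames stride : Int) : Nat → Int → List (Int × Int)
  | 0, _ => []
  | fuel + 1, current =>
    if current < total_frames then
      let e := min (current + target_frames) total_frames
      let remaining := total_frames - e
      if remaining > 0 then
        if remaining < stride then
          [(current, e), (total_frames - target_frames, total_frames)]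
        else
          (current, e) :: pvALoop total_frames target_frames stride fuel (current + stride)
      else
        [(current, e)]
    else []

def calculate_temporal_tiles_py (total_frames : Int) (target_frames : Int) (overlap : Int) : List (Int × Int) :=
  if total_frames ≤ target_frames then [(0, total_frames)]
  else
    let stride := target_frames - overlap
    pvALoop total_frames target_frames stride (total_frames.toNat + 1) 0

-- ===== PORT B =====
-- B computes the number n of regular tiles in closed form (ceiling division, written as
-- Python's -((target - total) // stride)) and maps over range(n); no loop state.
def calculate_temporal_tiles_py_alt (total_frames : Int) (target_frames : Int) (overlap : Int) : List (Int × Int) :=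
  if total_frames ≤ target_frames then [(0, total_frames)]
  else
    let stride := target_frames - overlap
    let n := -(PySem.Int.floordiv (target_frames - total_frames) stride)
    ((PySem.List.pyRange 0 n 1).map (fun k => (k * stride, k * stride + target_frames)))
      ++ [(total_frames - target_frames, total_frames)]

-- ===== PRECONDITION & SPEC =====
-- Pre_ restricts to the natural domain: when tiling is needed (total_frames > target_frames) it
-- requires a positive target_frames (frame counts are positive; with target_frames ≤ 0 A's loop
-- can exit without the final covering tile) and a positive stride (overlap < target_frames;
-- with stride ≤ 0 A's Python loop never terminates, so A returns nothing there).
def Pre_calculate_temporal_tiles_py (total_frames : Int) (target_frames : Int) (overlap : Int) : Prop :=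
  total_frames ≤ target_frames ∨ (1 ≤ target_frames ∧ overlap < target_frames)
instance (total_frames : Int) (target_frames : Int) (overlap : Int) : Decidable (Pre_calculate_temporal_tiles_py total_frames target_frames overlap) := by unfold Pre_calculate_temporal_tiles_py; infer_instance

def pvWitness_calculate_temporal_tiles_py : Int × Int × Int := (10, 4, 1)

def Spec_calculate_temporal_tiles_py (total_frames : Int) (target_frames : Int) (overlap : Int) (out : List (Int × Int)) : Prop := out = calculate_temporal_tiles_py_alt total_frames target_frames overlap
instance (total_frames : Int) (target_frames : Int) (overlap : Int) (out : List (Int × Int)) : Decidable (Spec_calculate_temporal_tiles_py total_frames target_frames overlap out) := by unfold Spec_calculate_temporal_tiles_py; infer_instance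

-- ===== CLAIM =====
def Claim_equal_calculate_temporal_tiles_py : Prop := ∀ (total_frames : Int) (target_frames : Int) (overlap : Int), Dom_calculate_temporal_tiles_py total_frames target_frames overlap → Pre_calculate_temporal_tiles_py total_frames target_frames overlap → Spec_calculate_temporal_tiles_py total_frames target_frames overlap (calculate_temporal_tiles_py total_frames target_frames overlap)

-- ===== LEMMAS AND PROOFS =====

-- A's loop computes exactly the closed-form tile list: n regular tiles starting at
-- current + k*stride, then the tail tile, whenever n is the ceiling count of the remaining span.
lemma pvLoop_closed (tf tar stride : Int) (htar : 1 ≤ tar) (hstr : 1 ≤ stride) :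
    ∀ (fuel : Nat) (current : Int) (n : Nat),
      current + tar ≤ tf →
      tf - tar - current ≤ (n : Int) * stride →
      ((n : Int) - 1) * stride < tf - tar - current →
      (tf - tar - current).toNat < fuel →
      pvALoop tf tar stride fuel current =
        ((List.range n).map (fun (k : Nat) => (current + (k : Int) * stride, current + (k : Int) * stride + tar)))
          ++ [(tf - tar, tf)] := by
  intro fuel
  induction fuel with
  | zero => intro current n _ _ _ hf; omega
  | succ m ih =>
    intro current n hle hub hlb hf
    have hcur : current < tf := by omega
    have hmin : min (current + tar) tf = current + tar := by omega
    by_cases hrem : tf - (current + tar) > 0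
    · have hn1 : 1 ≤ n := by
        by_contra h
        have : n = 0 := by omega
        subst this
        simp at hub hlb
        omega
      obtain ⟨p, rfl⟩ : ∃ p, n = p + 1 := ⟨n - 1, by omega⟩
      by_cases hbr : tf - (current + tar) < stride
      · -- A breaks: one regular tile then the tail; n must be 1
        have hp0 : p = 0 := by
          by_contra h
          have hp1 : 1 ≤ p := by omega
          have : (1 : Int) * stride ≤ ((p : Int) + 1 - 1) * stride := by
            apply mul_le_mul_of_nonneg_right _ (by omega)
            omega
          push_cast at hlb
          omega
        subst hp0
        simp [pvALoop, hcur, hmin, hbr]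
        omega
      · -- both continue: peel k = 0 off the range and recurse at current + stride
        push_cast at hub hlb
        have hle' : (current + stride) + tar ≤ tf := by omega
        have hub' : tf - tar - (current + stride) ≤ (p : Int) * stride := by push_cast; nlinarith
        have hlb' : ((p : Int) - 1) * stride < tf - tar - (current + stride) := by push_cast; nlinarith
        have hf' : (tf - tar - (current + stride)).toNat < m := by omega
        have hih := ih (current + stride) p hle' hub' hlb' hf'
        rw [List.range_succ_eq_map]
        simp only [pvALoop, if_pos hcur, hmin, if_pos hrem, if_neg hbr, hih,
          List.map_cons, List.map_map, List.cons_append]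
        refine congrArg₂ _ (by push_cast; ring_nf) (congrArg₂ _ ?_ rfl)
        apply List.map_congr_left
        intro k _
        simp only [Function.comp]
        push_cast
        simp only [Prod.mk.injEq]; constructor <;> ring
    · -- remaining = 0: A emits the last tile; n must be 0
      have hceq : current = tf - tar := by omega
      have hn0 : n = 0 := by
        by_contra h
        have hn1 : (1 : Int) ≤ (n : Int) := by exact_mod_cast Nat.one_le_iff_ne_zero.mpr h
        have : (0 : Int) ≤ ((n : Int) - 1) * stride := mul_nonneg (by omega) (by omega)
        omega
      subst hn0
      simp [pvALoop, hceq]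
      omega

-- ===== VERDICT =====
theorem calculate_temporal_tiles_py_spec : Claim_equal_calculate_temporal_tiles_py := by
  intro tf tar ov _ hpre
  unfold Spec_calculate_temporal_tiles_py
  unfold calculate_temporal_tiles_py calculate_temporal_tiles_py_alt
  by_cases h : tf ≤ tar
  · simp [h]
  · have hpre' : 1 ≤ tar ∧ ov < tar := by
      rcases hpre with h1 | h2
      · exact absurd h1 h
      · exact h2
    simp only [h, if_false]
    set stride := tar - ov with hs
    have hstr : 1 ≤ stride := by omega
    set n : Int := -(PySem.Int.floordiv (tar - tf) stride) with hn
    have hbnd : ((n - 1) * stride < tf - tar ∧ tf - tar ≤ n * stride) := by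
      have := (PySem.Int.neg_floordiv_neg_eq_iff_of_pos (a := tf - tar) (b := stride)
        (q := n) (by omega)).mp
      simp only [neg_sub] at this
      exact this hn.symm
    have hnpos : 0 < n := by nlinarith [hbnd.1, hbnd.2]
    rw [PySem.List.pyRange_one]
    have hcast : ((n.toNat : Int)) = n := Int.toNat_of_nonneg (by omega)
    rw [pvLoop_closed tf tar stride hpre'.1 hstr (tf.toNat + 1) 0 ((n - 0).toNat)
      (by omega) (by simp only [sub_zero, hcast]; omega)
      (by simp only [sub_zero, hcast]; omega) (by omega)]
    refine congrArg₂ _ ?_ rfl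
    rw [List.map_map]
    apply List.map_congr_left
    intro k _
    simp only [Function.comp]
    simp only [Prod.mk.injEq]; constructor <;> ring
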